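-- pv_equiv track=rewrite | github.com/LinxISA/LinxCore | tools/generate/opcode_catalog_lib.py | classify_fields
-- ===== SOURCE A (Python) =====
-- from typing import Dict, Iterable, List
--
-- def classify_fields(fields: Iterable[str]) -> tuple[str, str, str, str]:
--     rd_kind = "NONE"
--     rs1_kind = "NONE"
--     rs2_kind = "NONE"
--     imm_kind = "NONE"
--     tokens = list(fields)
--     for tok in tokens:
--         core = tok
--         if "=" in core:
--             core = core.split("=", 1)[1]
--         if core.startswith("%"):
--             core = core[1:]
--         name = core.lower()
--         if name in {"regdst", "rd", "dsttype"}: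
--             rd_kind = "REG"
--         elif name in {"srcl", "src0", "srca"}:
--             rs1_kind = "REG"
--         elif name in {"srcr", "src1", "srcd", "srcp"}:
--             rs2_kind = "REG"
--         if "imm" in name:
--             if imm_kind == "NONE":
--                 imm_kind = name.upper()
--     return rd_kind, rs1_kind, rs2_kind, imm_kind
-- ===== SOURCE B (Python) =====
-- def classify_fields(fields):
--     def norm(tok):
--         core = tok.split("=", 1)[1] if "=" in tok else tok
--         if core.startswith("%"):
--             core = core[1:]
--         return core.lower()
--     names = [norm(t) for t in fields]
--     rd_kind = "REG" if any(n in ("regdst", "rd", "dsttype") for n in names) else "NONE"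
--     rs1_kind = "REG" if any(n in ("srcl", "src0", "srca") for n in names) else "NONE"
--     rs2_kind = "REG" if any(n in ("srcr", "src1", "srcd", "srcp") for n in names) else "NONE"
--     imm_kind = next((n.upper() for n in names if "imm" in n), "NONE")
--     return rd_kind, rs1_kind, rs2_kind, imm_kind
-- ===== Notes on version B (the rewrite author's own statement) =====
-- stated objective: alternative
-- what changed: Replaced the single interleaved stateful loop with a normalize-once pass producing a name list, then four independent reductions: three any() membership tests for the register kinds and a next() first-match for the immediate kind.
import Mathlib
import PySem

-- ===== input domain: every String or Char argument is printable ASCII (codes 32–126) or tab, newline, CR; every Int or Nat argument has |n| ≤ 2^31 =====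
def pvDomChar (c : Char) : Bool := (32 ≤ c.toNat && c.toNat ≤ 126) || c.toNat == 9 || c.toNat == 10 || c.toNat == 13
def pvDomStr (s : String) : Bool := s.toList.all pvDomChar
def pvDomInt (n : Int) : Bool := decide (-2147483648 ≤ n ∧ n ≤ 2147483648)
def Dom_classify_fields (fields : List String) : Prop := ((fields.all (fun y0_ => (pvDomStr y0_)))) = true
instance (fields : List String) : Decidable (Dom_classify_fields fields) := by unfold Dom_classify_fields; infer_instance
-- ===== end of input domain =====

-- B replaces A's single interleaved stateful loop by a normalize-once map followed by four
-- independent reductions (three any-tests and one first-match); objective: alternative decomposition.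

-- ===== PORT A =====
-- literal transliteration of A's single loop over the tokens with four pieces of state
def classify_fields (fields : List String) : String × String × String × String :=
  let tokens := fields
  let st := tokens.foldl (fun (s : String × String × String × String) tok =>
    let core := tok
    -- tok.split("=", 1)[1]: inside the '=' ∈ core branch the split always has two pieces,
    -- so the [1] index is total here (the defaults are never used)
    let core := if PySem.Str.isIn "=" core then
        (((PySem.Str.splitMax? core "=" 1).getD []).getD 1 "") else core
    let core := if PySem.Str.startswith core "%" then PySem.Str.slice core (some 1) none else core
    let name := PySem.Str.lower core
    let (rd, rs1, rs2, imm) := s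
    let (rd, rs1, rs2) :=
      if name == "regdst" || name == "rd" || name == "dsttype" then ("REG", rs1, rs2)
      else if name == "srcl" || name == "src0" || name == "srca" then (rd, "REG", rs2)
      else if name == "srcr" || name == "src1" || name == "srcd" || name == "srcp" then (rd, rs1, "REG")
      else (rd, rs1, rs2)
    let imm := if PySem.Str.isIn "imm" name then
        (if imm == "NONE" then PySem.Str.upper name else imm) else imm
    (rd, rs1, rs2, imm)) ("NONE", "NONE", "NONE", "NONE")
  st

-- ===== PORT B =====
-- B's helper `norm`: split on the first '=' taking the right side, drop a leading '%', lowercase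
def pvNorm (tok : String) : String :=
  let core := if PySem.Str.isIn "=" tok then
      (((PySem.Str.splitMax? tok "=" 1).getD []).getD 1 "") else tok
  let core := if PySem.Str.startswith core "%" then PySem.Str.slice core (some 1) none else core
  PySem.Str.lower core

def classify_fields_alt (fields : List String) : String × String × String × String :=
  let names := fields.map pvNorm
  let rd_kind := if names.any (fun n => n == "regdst" || n == "rd" || n == "dsttype") then "REG" else "NONE"
  let rs1_kind := if names.any (fun n => n == "srcl" || n == "src0" || n == "srca") then "REG" else "NONE"
  let rs2_kind := if names.any (fun n => n == "srcr" || n == "src1" || n == "srcd" || n == "srcp") then "REG" else "NONE"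
  let imm_kind := match names.find? (fun n => PySem.Str.isIn "imm" n) with
    | some n => PySem.Str.upper n
    | none => "NONE"
  (rd_kind, rs1_kind, rs2_kind, imm_kind)

-- ===== PRECONDITION & SPEC =====
def Spec_classify_fields (fields : List String) (out : String × String × String × String) : Prop := out = classify_fields_alt fields
instance (fields : List String) (out : String × String × String × String) : Decidable (Spec_classify_fields fields out) := by unfold Spec_classify_fields; infer_instance

-- ===== CLAIM (what is proved, stated in full; the proofs are below) =====
def Claim_equal_classify_fields : Prop := ∀ (fields : List String), Dom_classify_fields fields → Spec_classify_fields fields (classify_fields fields)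

-- ===== LEMMAS AND PROOFS =====

-- A's loop body, expressed via pvNorm (definitionally the lambda inside classify_fields)
def pvStepA (s : String × String × String × String) (tok : String) : String × String × String × String :=
  let name := pvNorm tok
  let (rd, rs1, rs2, imm) := s
  let (rd, rs1, rs2) :=
    if name == "regdst" || name == "rd" || name == "dsttype" then ("REG", rs1, rs2)
    else if name == "srcl" || name == "src0" || name == "srca" then (rd, "REG", rs2)
    else if name == "srcr" || name == "src1" || name == "srcd" || name == "srcp" then (rd, rs1, "REG")
    else (rd, rs1, rs2)
  let imm := if PySem.Str.isIn "imm" name then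
      (if imm == "NONE" then PySem.Str.upper name else imm) else imm
  (rd, rs1, rs2, imm)

-- the lambda in classify_fields is pvStepA up to unfolding pvNorm
lemma step_eq : (fun (s : String × String × String × String) tok =>
    let core := tok
    let core := if PySem.Str.isIn "=" core then
        (((PySem.Str.splitMax? core "=" 1).getD []).getD 1 "") else core
    let core := if PySem.Str.startswith core "%" then PySem.Str.slice core (some 1) none else core
    let name := PySem.Str.lower core
    let (rd, rs1, rs2, imm) := s
    let (rd, rs1, rs2) :=
      if name == "regdst" || name == "rd" || name == "dsttype" then ("REG", rs1, rs2)
      else if name == "srcl" || name == "src0" || name == "srca" then (rd, "REG", rs2)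
      else if name == "srcr" || name == "src1" || name == "srcd" || name == "srcp" then (rd, rs1, "REG")
      else (rd, rs1, rs2)
    let imm := if PySem.Str.isIn "imm" name then
        (if imm == "NONE" then PySem.Str.upper name else imm) else imm
    ((rd, rs1, rs2, imm) : String × String × String × String)) = pvStepA := by
  funext s tok
  obtain ⟨rd, rs1, rs2, imm⟩ := s
  simp [pvStepA, pvNorm]

lemma classify_eq_foldl (fields : List String) :
    classify_fields fields = fields.foldl pvStepA ("NONE", "NONE", "NONE", "NONE") := by
  unfold classify_fields
  rw [step_eq]

def pRd (n : String) : Bool := n == "regdst" || n == "rd" || n == "dsttype"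
def pRs1 (n : String) : Bool := n == "srcl" || n == "src0" || n == "srca"
def pRs2 (n : String) : Bool := n == "srcr" || n == "src1" || n == "srcd" || n == "srcp"

-- a name containing "imm" cannot upper-case to "NONE"
lemma upper_ne_none (n : String) (h : PySem.Str.isIn "imm" n = true) :
    PySem.Str.upper n ≠ "NONE" := by
  intro heq
  have hinf : ("imm" : String).toList <:+: n.toList := (PySem.Str.isIn_iff_infix _ _).mp h
  have hm : 'i' ∈ n.toList := hinf.subset (by decide)
  have hl : (PySem.Str.upper n).toList = ("NONE" : String).toList := by rw [heq]
  rw [PySem.Str.toList_upper] at hl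
  have : PySem.Chars.upperChar 'i' ∈ PySem.Chars.upper n.toList := by
    simp [PySem.Chars.upper]
    exact ⟨'i', hm, rfl⟩
  rw [hl] at this
  revert this; decide

lemma pvStepA_mk (rd rs1 rs2 imm tok : String) : pvStepA (rd, rs1, rs2, imm) tok =
    ((if pRd (pvNorm tok) then "REG" else rd),
     (if pRd (pvNorm tok) then rs1 else if pRs1 (pvNorm tok) then "REG" else rs1),
     (if pRd (pvNorm tok) then rs2 else if pRs1 (pvNorm tok) then rs2 else if pRs2 (pvNorm tok) then "REG" else rs2),
     (if PySem.Str.isIn "imm" (pvNorm tok) then (if imm == "NONE" then PySem.Str.upper (pvNorm tok) else imm) else imm)) := by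
  simp only [pvStepA, pRd, pRs1, pRs2]
  split_ifs <;> rfl

-- the three register name sets are pairwise disjoint
lemma not_rd_rs1 (n : String) (h : pRd n = true) (h2 : pRs1 n = true) : False := by
  simp only [pRd, Bool.or_eq_true, beq_iff_eq] at h
  rcases h with (rfl | rfl) | rfl <;> revert h2 <;> decide
lemma not_rd_rs2 (n : String) (h : pRd n = true) (h2 : pRs2 n = true) : False := by
  simp only [pRd, Bool.or_eq_true, beq_iff_eq] at h
  rcases h with (rfl | rfl) | rfl <;> revert h2 <;> decide
lemma not_rs1_rs2 (n : String) (h : pRs1 n = true) (h2 : pRs2 n = true) : False := by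
  simp only [pRs1, Bool.or_eq_true, beq_iff_eq] at h
  rcases h with (rfl | rfl) | rfl <;> revert h2 <;> decide

-- loop invariant: A's fold from an arbitrary state, characterised componentwise
lemma foldA_eq (l : List String) (rd rs1 rs2 imm : String) :
    l.foldl pvStepA (rd, rs1, rs2, imm) =
      ((if l.any (fun t => pRd (pvNorm t)) then "REG" else rd),
       (if l.any (fun t => pRs1 (pvNorm t)) then "REG" else rs1),
       (if l.any (fun t => pRs2 (pvNorm t)) then "REG" else rs2),
       (if imm == "NONE" then
          match l.find? (fun t => PySem.Str.isIn "imm" (pvNorm t)) with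
          | some t => PySem.Str.upper (pvNorm t)
          | none => imm
        else imm)) := by
  induction l generalizing rd rs1 rs2 imm with
  | nil => simp
  | cons t l ih =>
    rw [List.foldl_cons, pvStepA_mk, ih]
    by_cases h4 : PySem.Str.isIn "imm" (pvNorm t) = true
    · rw [List.find?_cons_of_pos (p := fun t => PySem.Str.isIn "imm" (pvNorm t)) h4]
      have hup := upper_ne_none (pvNorm t) h4
      simp at h4
      by_cases h1 : pRd (pvNorm t) <;> by_cases h2 : pRs1 (pvNorm t) <;>
        by_cases h3 : pRs2 (pvNorm t) <;> by_cases h5 : imm == "NONE" <;>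
        first
          | exact absurd h2 (fun hh => not_rd_rs1 _ h1 hh)
          | exact absurd h3 (fun hh => not_rd_rs2 _ h1 hh)
          | exact absurd h3 (fun hh => not_rs1_rs2 _ h2 hh)
          | simp [h1, h2, h3, h4, h5, hup]
    · rw [List.find?_cons_of_neg (p := fun t => PySem.Str.isIn "imm" (pvNorm t)) h4]
      simp at h4
      by_cases h1 : pRd (pvNorm t) <;> by_cases h2 : pRs1 (pvNorm t) <;>
        by_cases h3 : pRs2 (pvNorm t) <;> by_cases h5 : imm == "NONE" <;>
        first
          | exact absurd h2 (fun hh => not_rd_rs1 _ h1 hh)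
          | exact absurd h3 (fun hh => not_rd_rs2 _ h1 hh)
          | exact absurd h3 (fun hh => not_rs1_rs2 _ h2 hh)
          | simp [h1, h2, h3, h4, h5]

-- ===== VERDICT (by name: the statement is the Claim_ definition above) =====
theorem classify_fields_spec : Claim_equal_classify_fields := by
  intro fields _
  unfold Spec_classify_fields classify_fields_alt
  rw [classify_eq_foldl, foldA_eq]
  simp only [List.any_map, List.find?_map, Function.comp_def]
  cases hfind : fields.find? (fun t => PySem.Str.isIn "imm" (pvNorm t)) <;>
    simp [pRd, pRs1, pRs2]
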